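-- pv_equiv track=rewrite | github.com/bica-tools/reticulate | reticulate/tutte.py | _rank_and_nullity
-- ===== SOURCE A (Python) =====
-- def _connected_components(nodes: list[int], edges: list[tuple[int, int]]) -> int:
--     """Count connected components via union-find."""
--     parent: dict[int, int] = {n: n for n in nodes}
--
--     def find(x: int) -> int:
--         while parent[x] != x:
--             parent[x] = parent[parent[x]]
--             x = parent[x]
--         return x
--
--     def union(a: int, b: int) -> None:
--         ra, rb = find(a), find(b)
--         if ra != rb:
--             parent[ra] = rb
--
--     for u, v in edges:
--         union(u, v)
--
--     return len({find(n) for n in nodes})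
--
-- def _rank_and_nullity(
--     nodes: list[int],
--     all_edges: list[tuple[int, int]],
--     subset_mask: int,
-- ) -> tuple[int, int]:
--     """Compute rank and nullity of a spanning subgraph.
--
--     rank(A) = |V| - c(A) where c(A) is the number of components.
--     nullity(A) = |A| - rank(A).
--     """
--     sub_edges = [all_edges[i] for i in range(len(all_edges)) if subset_mask & (1 << i)]
--     c = _connected_components(nodes, sub_edges)
--     n = len(nodes)
--     r = n - c
--     size = bin(subset_mask).count('1')
--     return r, size - r
-- ===== SOURCE B (Python) =====
-- def _rank_and_nullity(
--     nodes: list[int],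
--     all_edges: list[tuple[int, int]],
--     subset_mask: int,
-- ) -> tuple[int, int]:
--     """Compute rank and nullity of a spanning subgraph.
--
--     Flat component labels instead of a union-find forest: comp maps each
--     node to its component's label; merging relabels one class in place.
--     """
--     comp = {n: n for n in nodes}
--     for i, (u, v) in enumerate(all_edges):
--         if subset_mask & (1 << i):
--             cu, cv = comp[u], comp[v]
--             if cu != cv:
--                 for k in comp:
--                     if comp[k] == cu:
--                         comp[k] = cv
--     c = len(set(comp.values()))
--     r = len(nodes) - c
--     size = bin(subset_mask).count("1")
--     return r, size - r
-- ===== Notes on version B (the rewrite author's own statement) =====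
-- stated objective: alternative
-- what changed: Replaces the union-find forest (path-halving find, root linking, final find-per-node set) with a flat label map: each node carries its component label, a merge relabels one class in one sweep, and the component count is the number of distinct labels.
import Mathlib
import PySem

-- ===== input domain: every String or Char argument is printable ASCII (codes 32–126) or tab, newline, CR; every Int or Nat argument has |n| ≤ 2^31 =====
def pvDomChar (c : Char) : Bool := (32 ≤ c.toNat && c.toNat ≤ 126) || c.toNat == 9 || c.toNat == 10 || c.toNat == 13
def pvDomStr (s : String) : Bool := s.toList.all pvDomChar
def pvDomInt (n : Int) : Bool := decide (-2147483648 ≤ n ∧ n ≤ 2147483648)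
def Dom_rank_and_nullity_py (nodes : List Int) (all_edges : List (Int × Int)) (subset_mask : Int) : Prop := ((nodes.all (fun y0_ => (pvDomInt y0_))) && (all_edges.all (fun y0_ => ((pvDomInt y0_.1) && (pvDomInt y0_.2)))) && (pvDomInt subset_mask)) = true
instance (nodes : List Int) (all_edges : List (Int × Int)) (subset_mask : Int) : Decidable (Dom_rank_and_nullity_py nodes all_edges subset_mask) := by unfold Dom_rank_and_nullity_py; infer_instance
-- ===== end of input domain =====

-- B replaces A's union-find forest by a flat component-label map (one relabel
-- sweep per merge); same return value, a different algorithm of similar size.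

-- ===== PORT A =====
-- the inner `find` with path halving; `fuel` is a totality guard for the
-- Python while-loop (on admitted inputs the loop always stops well inside it).
-- `getD p x x` is Python's `parent[x]`: exact whenever x is a key (Pre_ ensures
-- every looked-up vertex is a key; a missing key would be a Python KeyError).
def pvFindA : Nat → PySem.Dict Int Int → Int → Int × PySem.Dict Int Int
  | 0, p, x => (x, p)
  | fuel+1, p, x =>
    let px := PySem.Dict.getD p x x
    if px = x then (x, p)
    else pvFindA fuel (PySem.Dict.insert p x (PySem.Dict.getD p px px)) (PySem.Dict.getD p px px)

def pvUnionA (fuel : Nat) (p : PySem.Dict Int Int) (a b : Int) : PySem.Dict Int Int :=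
  let fa := pvFindA fuel p a
  let fb := pvFindA fuel fa.2 b
  if fa.1 ≠ fb.1 then PySem.Dict.insert fb.2 fa.1 fb.1 else fb.2

def pvConnectedComponents (nodes : List Int) (edges : List (Int × Int)) : Int :=
  let parent := nodes.foldl (fun d n => PySem.Dict.insert d n n) PySem.Dict.empty
  let fuel := nodes.length + edges.length + 1
  let pfin := edges.foldl (fun q e => pvUnionA fuel q e.1 e.2) parent
  let roots := nodes.foldl
      (fun (acc : PySem.Set Int × PySem.Dict Int Int) n =>
        let f := pvFindA fuel acc.2 n
        (PySem.Set.add acc.1 f.1, f.2))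
      (PySem.Set.empty, pfin)
  ((roots.1.length : Int))

def rank_and_nullity_py (nodes : List Int) (all_edges : List (Int × Int)) (subset_mask : Int) : Int × Int :=
  let sub_edges := (PySem.List.pyRange 0 (all_edges.length : Int) 1).filterMap
      (fun i => if PySem.Int.band subset_mask (1 <<< i.toNat) ≠ 0
                then some (PySem.List.pyGetD all_edges i (0, 0)) else none)
  let c := pvConnectedComponents nodes sub_edges
  let n := (nodes.length : Int)
  let r := n - c
  let size := (PySem.Int.bitCount subset_mask : Int)   -- bin(subset_mask).count('1')
  (r, size - r)

-- ===== PORT B =====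
-- `for k in comp: if comp[k] == cu: comp[k] = cv` — keys are fixed during the
-- sweep (only values are overwritten), so folding over the key list is exact.
def pvRelabel (d : PySem.Dict Int Int) (cu cv : Int) : PySem.Dict Int Int :=
  (PySem.Dict.keys d).foldl
    (fun d' k => if PySem.Dict.getD d' k k = cu then PySem.Dict.insert d' k cv else d') d

-- one step of B's edge loop: `if subset_mask & (1 << i): …`; `getD d u u` is
-- Python's `comp[u]` (exact whenever u is a key, which Pre_ ensures).
def pvStepB (subset_mask : Int) (d : PySem.Dict Int Int) (ie : Int × (Int × Int)) : PySem.Dict Int Int :=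
  if PySem.Int.band subset_mask (1 <<< ie.1.toNat) ≠ 0 then
    let cu := PySem.Dict.getD d ie.2.1 ie.2.1
    let cv := PySem.Dict.getD d ie.2.2 ie.2.2
    if cu ≠ cv then pvRelabel d cu cv else d
  else d

def rank_and_nullity_py_alt (nodes : List Int) (all_edges : List (Int × Int)) (subset_mask : Int) : Int × Int :=
  let comp0 := nodes.foldl (fun d n => PySem.Dict.insert d n n) PySem.Dict.empty
  let comp := (PySem.List.enumerate all_edges 0).foldl (pvStepB subset_mask) comp0
  let c := ((PySem.Set.ofList (PySem.Dict.values comp)).length : Int)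
  let n := (nodes.length : Int)
  let r := n - c
  let size := (PySem.Int.bitCount subset_mask : Int)   -- bin(subset_mask).count('1')
  (r, size - r)

-- ===== PRECONDITION & SPEC =====
-- Pre_ excludes exactly the inputs where the Python raises KeyError: a selected
-- edge whose endpoint is not in `nodes` (both A's `parent[x]` and B's `comp[u]`
-- raise there).
def Pre_rank_and_nullity_py (nodes : List Int) (all_edges : List (Int × Int)) (subset_mask : Int) : Prop :=
  ∀ pr ∈ PySem.List.enumerate all_edges 0,
    PySem.Int.band subset_mask (1 <<< pr.1.toNat) ≠ 0 → pr.2.1 ∈ nodes ∧ pr.2.2 ∈ nodes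

instance (nodes : List Int) (all_edges : List (Int × Int)) (subset_mask : Int) : Decidable (Pre_rank_and_nullity_py nodes all_edges subset_mask) := by unfold Pre_rank_and_nullity_py; infer_instance

def pvWitness_rank_and_nullity_py : List Int × (List (Int × Int)) × Int := ([0, 1, 2], [(0, 1), (1, 2)], 3)

def Spec_rank_and_nullity_py (nodes : List Int) (all_edges : List (Int × Int)) (subset_mask : Int) (out : Int × Int) : Prop := out = rank_and_nullity_py_alt nodes all_edges subset_mask
instance (nodes : List Int) (all_edges : List (Int × Int)) (subset_mask : Int) (out : Int × Int) : Decidable (Spec_rank_and_nullity_py nodes all_edges subset_mask out) := by unfold Spec_rank_and_nullity_py; infer_instance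

-- ===== CLAIM (what is proved, stated in full; the proofs are below) =====
def Claim_equal_rank_and_nullity_py : Prop := ∀ (nodes : List Int) (all_edges : List (Int × Int)) (subset_mask : Int), Dom_rank_and_nullity_py nodes all_edges subset_mask → Pre_rank_and_nullity_py nodes all_edges subset_mask → Spec_rank_and_nullity_py nodes all_edges subset_mask (rank_and_nullity_py nodes all_edges subset_mask)

-- ===== LEMMAS AND PROOFS =====

set_option maxHeartbeats 1000000

-- the total-function view of a parent/label dict: `pvF p y` is `p[y]`, with the
-- harmless default y for non-keys (non-keys are thus fixpoints)
def pvF (p : PySem.Dict Int Int) : Int → Int := fun y => PySem.Dict.getD p y y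
def pvUpd (f : Int → Int) (x v : Int) : Int → Int := fun y => if y = x then v else f y
-- every chain stabilizes within b steps
def pvInv (b : Nat) (f : Int → Int) : Prop := ∀ y, f (f^[b] y) = f^[b] y

theorem pvF_insert (p : PySem.Dict Int Int) (x v : Int) :
    pvF (PySem.Dict.insert p x v) = pvUpd (pvF p) x v := by
  funext y; simp [pvF, pvUpd, PySem.Dict.getD_insert]

theorem pv_reach_fix {f : Int → Int} {j m : Nat} {y z : Int}
    (hjm : j ≤ m) (h1 : f^[j] y = z) (h2 : f z = z) : f^[m] y = z := by
  have h3 := Function.iterate_add_apply f (m - j) j y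
  rw [Nat.sub_add_cancel hjm] at h3
  rw [h3, h1, Function.iterate_fixed h2]

theorem pv_upd_fix {f : Int → Int} {x v z : Int} (hz : f z = z) (hx : f x ≠ x) :
    pvUpd f x v z = z := by
  have hne : z ≠ x := fun h => hx (by rw [← h]; exact hz)
  simp [pvUpd, hne, hz]

theorem pv_inv_succ {f : Int → Int} {b : Nat} (h : pvInv b f) : pvInv (b+1) f := by
  intro y
  rw [Function.iterate_succ_apply', h y, h y]

theorem pv_iter_closed {f : Int → Int} {K : List Int} (hc : ∀ y ∈ K, f y ∈ K) :
    ∀ (m : Nat) {y : Int}, y ∈ K → f^[m] y ∈ K := by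
  intro m
  induction m with
  | zero => intro y hy; simpa using hy
  | succ m ih => intro y hy; rw [Function.iterate_succ_apply]; exact ih (hc y hy)

theorem pv_iter_two (f : Int → Int) (x : Int) : f^[2] x = f (f x) := by
  rw [show (2:Nat) = 1 + 1 from rfl, Function.iterate_add_apply]
  simp

theorem pv_halve_reach {f : Int → Int} {x : Int} (hx : f x ≠ x) :
    ∀ (k : Nat) (y z : Int), f^[k] y = z → f z = z →
      ∃ j, j ≤ k ∧ (pvUpd f x (f (f x)))^[j] y = z := by
  intro k
  induction k using Nat.strong_induction_on with
  | _ k ih =>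
    intro y z hreach hz
    by_cases hy : f y = y
    · have hzy : z = y := by rw [← hreach, Function.iterate_fixed hy]
      exact ⟨0, Nat.zero_le _, hzy.symm⟩
    · cases k with
      | zero =>
        simp only [Function.iterate_zero, id_eq] at hreach
        subst hreach
        exact absurd hz hy
      | succ k' =>
        by_cases hyx : y = x
        · cases k' with
          | zero =>
            refine ⟨1, le_rfl, ?_⟩
            rw [Function.iterate_one]
            have h1 : pvUpd f x (f (f x)) y = f (f x) := by simp [pvUpd, hyx]
            have h2 : f x = z := by rw [← hyx]; simpa using hreach
            rw [h1, h2, hz]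
          | succ k'' =>
            have hreach' : f^[k''] (f (f x)) = z := by
              have h3 := Function.iterate_add_apply f k'' 2 x
              rw [pv_iter_two] at h3
              rw [← h3, show k'' + 2 = k'' + 1 + 1 from rfl]
              rw [hyx] at hreach
              exact hreach
            obtain ⟨j, hj, hj2⟩ := ih k'' (by omega) (f (f x)) z hreach' hz
            refine ⟨j+1, by omega, ?_⟩
            rw [Function.iterate_succ_apply,
              show pvUpd f x (f (f x)) y = f (f x) from by simp [pvUpd, hyx], hj2]
        · have hreach' : f^[k'] (f y) = z := by
            rw [← Function.iterate_succ_apply]; exact hreach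
          obtain ⟨j, hj, hj2⟩ := ih k' (by omega) (f y) z hreach' hz
          exact ⟨j+1, by omega, by
            rw [Function.iterate_succ_apply,
              show pvUpd f x (f (f x)) y = f y from by simp [pvUpd, hyx], hj2]⟩

theorem pv_halve_stab {f : Int → Int} {x : Int} (hx : f x ≠ x) {b : Nat} (hb : pvInv b f) :
    (∀ y, (pvUpd f x (f (f x)))^[b] y = f^[b] y) ∧ pvInv b (pvUpd f x (f (f x))) := by
  have key : ∀ y, (pvUpd f x (f (f x)))^[b] y = f^[b] y := by
    intro y
    obtain ⟨j, hj, hj2⟩ := pv_halve_reach hx b y (f^[b] y) rfl (hb y)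
    exact pv_reach_fix hj hj2 (pv_upd_fix (hb y) hx)
  exact ⟨key, fun y => by rw [key y]; exact pv_upd_fix (hb y) hx⟩

theorem pv_union_tgt_fix {f : Int → Int} {ra rb : Int} (hrb : f rb = rb) {z : Int} (hz : f z = z) :
    pvUpd f ra rb (if z = ra then rb else z) = (if z = ra then rb else z) := by
  by_cases h : z = ra
  · simp only [h, if_pos rfl]
    by_cases h2 : rb = ra <;> simp [pvUpd, h2, hrb]
  · simp [pvUpd, h, hz]

theorem pv_union_reach {f : Int → Int} {ra rb : Int} (hra : f ra = ra) :
    ∀ (k : Nat) (y z : Int), f^[k] y = z → f z = z →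
      ∃ j, j ≤ k + 1 ∧ (pvUpd f ra rb)^[j] y = (if z = ra then rb else z) := by
  intro k
  induction k using Nat.strong_induction_on with
  | _ k ih =>
    intro y z hreach hz
    by_cases hy : f y = y
    · have hzy : z = y := by rw [← hreach, Function.iterate_fixed hy]
      subst hzy
      by_cases hyra : z = ra
      · refine ⟨1, by omega, ?_⟩
        rw [Function.iterate_one]
        simp [pvUpd, hyra]
      · exact ⟨0, Nat.zero_le _, by simp [hyra]⟩
    · cases k with
      | zero =>
        simp only [Function.iterate_zero, id_eq] at hreach
        subst hreach
        exact absurd hz hy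
      | succ k' =>
        have hyra : y ≠ ra := fun h => hy (by rw [h]; exact hra)
        have hreach' : f^[k'] (f y) = z := by
          rw [← Function.iterate_succ_apply]; exact hreach
        obtain ⟨j, hj, hj2⟩ := ih k' (by omega) (f y) z hreach' hz
        refine ⟨j+1, by omega, ?_⟩
        rw [Function.iterate_succ_apply,
          show pvUpd f ra rb y = f y from by simp [pvUpd, hyra], hj2]

theorem pv_union_stab {f : Int → Int} {ra rb : Int} (hra : f ra = ra) (hrb : f rb = rb)
    {b : Nat} (hb : pvInv b f) :
    (∀ y, (pvUpd f ra rb)^[b+1] y = (if f^[b] y = ra then rb else f^[b] y)) ∧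
      pvInv (b+1) (pvUpd f ra rb) := by
  have key : ∀ y, (pvUpd f ra rb)^[b+1] y = (if f^[b] y = ra then rb else f^[b] y) := by
    intro y
    obtain ⟨j, hj, hj2⟩ := pv_union_reach (rb := rb) hra b y (f^[b] y) rfl (hb y)
    exact pv_reach_fix hj hj2 (pv_union_tgt_fix hrb (hb y))
  exact ⟨key, fun y => by rw [key y]; exact pv_union_tgt_fix hrb (hb y)⟩

theorem pv_find_spec :
    ∀ (fuel : Nat) (p : PySem.Dict Int Int) (x : Int) (k b : Nat) (K : List Int),
      k < fuel →
      pvF p ((pvF p)^[k] x) = (pvF p)^[k] x →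
      pvInv b (pvF p) →
      PySem.Dict.keys p = K →
      (∀ y ∈ K, pvF p y ∈ K) →
      (pvFindA fuel p x).1 = (pvF p)^[k] x ∧
      (∀ z, pvF p z = z → pvF (pvFindA fuel p x).2 z = z) ∧
      (∀ y, (pvF (pvFindA fuel p x).2)^[b] y = (pvF p)^[b] y) ∧
      pvInv b (pvF (pvFindA fuel p x).2) ∧
      PySem.Dict.keys (pvFindA fuel p x).2 = K ∧
      (∀ y ∈ K, pvF (pvFindA fuel p x).2 y ∈ K) := by
  intro fuel
  induction fuel with
  | zero => intro _ _ k _ _ hk; omega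
  | succ fuel ih =>
    intro p x k b K hk hfixk hinv hkeys hclosed
    by_cases hpx : PySem.Dict.getD p x x = x
    · have hres : pvFindA (fuel+1) p x = (x, p) := by simp [pvFindA, hpx]
      rw [hres]
      refine ⟨?_, fun z hz => hz, fun y => rfl, hinv, hkeys, hclosed⟩
      exact (Function.iterate_fixed (show pvF p x = x from hpx) k).symm
    · have hx : pvF p x ≠ x := hpx
      have hres : pvFindA (fuel+1) p x
          = pvFindA fuel (PySem.Dict.insert p x (pvF p (pvF p x))) (pvF p (pvF p x)) := by
        simp [pvFindA, hpx]; rfl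
      set f := pvF p with hf
      set p' := PySem.Dict.insert p x (f (f x)) with hp'
      have hfp' : pvF p' = pvUpd f x (f (f x)) := pvF_insert p x (f (f x))
      have hcont : PySem.Dict.contains p x = true := by
        by_cases h : PySem.Dict.contains p x = true
        · exact h
        · exact absurd (PySem.Dict.getD_of_not_contains p x (by simpa using h)) hpx
      have hxK : x ∈ K := hkeys ▸ ((PySem.Dict.contains_iff_mem_keys p x).mp hcont)
      have hkeys' : PySem.Dict.keys p' = K := by
        rw [hp', PySem.Dict.keys_insert_of_contains p (f (f x)) hcont]; exact hkeys
      have hclosed' : ∀ y ∈ K, pvF p' y ∈ K := by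
        intro y hy
        rw [hfp']
        by_cases hyx : y = x
        · simp only [pvUpd, hyx, if_pos rfl]
          exact hclosed _ (hclosed _ hxK)
        · simp only [pvUpd, if_neg hyx]
          exact hclosed _ hy
      have hstab := pv_halve_stab hx hinv
      have hinv' : pvInv b (pvF p') := by rw [hfp']; exact hstab.2
      have hz : f (f^[k] x) = f^[k] x := hfixk
      have hprog : ∃ k', k' < fuel ∧ (pvF p')^[k'] (f (f x)) = f^[k] x := by
        rcases Nat.lt_or_ge k 2 with h2 | h2
        · have hk1 : 1 ≤ k := by
            rcases Nat.eq_zero_or_pos k with h0 | h1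
            · exfalso
              rw [h0] at hz
              simp only [Function.iterate_zero, id_eq] at hz
              exact hx hz
            · exact h1
          have hk2 : k = 1 := by omega
          subst hk2
          refine ⟨0, by omega, ?_⟩
          simp only [Function.iterate_zero, id_eq]
          simp only [Function.iterate_one] at hz ⊢
          exact hz
        · have h3 := Function.iterate_add_apply f (k-2) 2 x
          rw [pv_iter_two] at h3
          rw [show k - 2 + 2 = k from by omega] at h3
          obtain ⟨j, hj, hj2⟩ := pv_halve_reach hx (k-2) (f (f x)) (f^[k] x) h3.symm hz
          refine ⟨j, by omega, ?_⟩
          rw [hfp']; exact hj2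
      obtain ⟨k', hk', hk'2⟩ := hprog
      have hfix' : pvF p' ((pvF p')^[k'] (f (f x))) = (pvF p')^[k'] (f (f x)) := by
        rw [hk'2, hfp']; exact pv_upd_fix hz hx
      obtain ⟨C1, C2, C3, C4, C5, C6⟩ := ih p' (f (f x)) k' b K hk' hfix' hinv' hkeys' hclosed'
      rw [hres]
      exact ⟨by rw [C1, hk'2],
        fun z hzfix => C2 z (by rw [hfp']; exact pv_upd_fix hzfix hx),
        fun y => by rw [C3 y, hfp', hstab.1 y], C4, C5, C6⟩

-- one union step: Inv advances by one, keys/closure are kept, and the root map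
-- at exponent b+1 is the old root map with class(a) redirected to class(c)
theorem pv_union_spec (fuel b : Nat) (K : List Int) (p : PySem.Dict Int Int) (a c : Int)
    (hb : b < fuel) (hinv : pvInv b (pvF p)) (hkeys : PySem.Dict.keys p = K)
    (hclosed : ∀ y ∈ K, pvF p y ∈ K) (ha : a ∈ K) (hc : c ∈ K) :
    pvInv (b+1) (pvF (pvUnionA fuel p a c)) ∧
    PySem.Dict.keys (pvUnionA fuel p a c) = K ∧
    (∀ y ∈ K, pvF (pvUnionA fuel p a c) y ∈ K) ∧
    (∀ y, (pvF (pvUnionA fuel p a c))^[b+1] y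
        = (if (pvF p)^[b] y = (pvF p)^[b] a then (pvF p)^[b] c else (pvF p)^[b] y)) := by
  have hUeq : pvUnionA fuel p a c
      = (if (pvFindA fuel p a).1 ≠ (pvFindA fuel (pvFindA fuel p a).2 c).1
         then PySem.Dict.insert (pvFindA fuel (pvFindA fuel p a).2 c).2
                (pvFindA fuel p a).1 (pvFindA fuel (pvFindA fuel p a).2 c).1
         else (pvFindA fuel (pvFindA fuel p a).2 c).2) := rfl
  obtain ⟨A1, A2, A3, A4, A5, A6⟩ := pv_find_spec fuel p a b b K hb (hinv a) hinv hkeys hclosed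
  obtain ⟨B1, B2, B3, B4, B5, B6⟩ :=
    pv_find_spec fuel (pvFindA fuel p a).2 c b b K hb (A4 c) A4 A5 A6
  have hrb : (pvFindA fuel (pvFindA fuel p a).2 c).1 = (pvF p)^[b] c := by rw [B1, A3]
  rw [hUeq, A1, hrb]
  set p2 := (pvFindA fuel (pvFindA fuel p a).2 c).2 with hp2
  have hr2 : ∀ y, (pvF p2)^[b] y = (pvF p)^[b] y := fun y => by rw [B3, A3]
  have hfixa : pvF p2 ((pvF p)^[b] a) = (pvF p)^[b] a := B2 _ (A2 _ (hinv a))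
  have hfixc : pvF p2 ((pvF p)^[b] c) = (pvF p)^[b] c := by
    have h1 := A4 c
    rw [A3 c] at h1
    exact B2 _ h1
  by_cases hne : (pvF p)^[b] a = (pvF p)^[b] c
  · rw [if_neg (by simp [hne])]
    refine ⟨pv_inv_succ B4, B5, B6, fun y => ?_⟩
    rw [Function.iterate_succ_apply', B4 y, hr2 y]
    by_cases h : (pvF p)^[b] y = (pvF p)^[b] a
    · rw [if_pos h, h, hne]
    · rw [if_neg h]
  · rw [if_pos hne]
    have hup : pvF (PySem.Dict.insert p2 ((pvF p)^[b] a) ((pvF p)^[b] c))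
        = pvUpd (pvF p2) ((pvF p)^[b] a) ((pvF p)^[b] c) := pvF_insert p2 _ _
    have hstab := pv_union_stab hfixa hfixc B4
    have hraK : (pvF p)^[b] a ∈ K := pv_iter_closed hclosed b ha
    have hcont2 : PySem.Dict.contains p2 ((pvF p)^[b] a) = true :=
      (PySem.Dict.contains_iff_mem_keys p2 _).mpr (B5 ▸ hraK)
    refine ⟨?_, ?_, ?_, fun y => ?_⟩
    · rw [hup]; exact hstab.2
    · rw [PySem.Dict.keys_insert_of_contains p2 _ hcont2]; exact B5
    · intro y hy
      rw [hup]
      by_cases hyr : y = (pvF p)^[b] a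
      · simp only [pvUpd, hyr, if_pos rfl]
        exact pv_iter_closed hclosed b hc
      · simp only [pvUpd, if_neg hyr]
        exact B6 y hy
    · rw [hup, hstab.1 y, hr2 y]

-- B's relabel sweep, over any nodup sublist of the keys
theorem pv_relabel_go (cu cv : Int) :
    ∀ (L : List Int) (d d0 : PySem.Dict Int Int) (K : List Int),
      L.Nodup → (∀ m ∈ L, m ∈ K) → PySem.Dict.keys d = K →
      (∀ m ∈ L, pvF d m = pvF d0 m) →
      PySem.Dict.keys (L.foldl (fun d' k => if PySem.Dict.getD d' k k = cu then PySem.Dict.insert d' k cv else d') d) = K ∧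
      (∀ m, pvF (L.foldl (fun d' k => if PySem.Dict.getD d' k k = cu then PySem.Dict.insert d' k cv else d') d) m
          = if m ∈ L ∧ pvF d0 m = cu then cv else pvF d m) := by
  intro L
  induction L with
  | nil =>
    intro d d0 K _ _ hkeys _
    refine ⟨hkeys, fun m => ?_⟩
    rw [if_neg (show ¬((m ∈ ([] : List Int)) ∧ pvF d0 m = cu) from fun hcc => by simp at hcc)]
    rfl
  | cons a L' ih =>
    intro d d0 K hnd hsub hkeys hagree
    have hkK : a ∈ K := hsub a (by simp)
    have hcontk : PySem.Dict.contains d a = true :=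
      (PySem.Dict.contains_iff_mem_keys d a).mpr (hkeys ▸ hkK)
    have hagreek : pvF d a = pvF d0 a := hagree a (by simp)
    have hkeysstep : PySem.Dict.keys (if PySem.Dict.getD d a a = cu then PySem.Dict.insert d a cv else d) = K := by
      by_cases h : PySem.Dict.getD d a a = cu
      · rw [if_pos h, PySem.Dict.keys_insert_of_contains d cv hcontk]; exact hkeys
      · rw [if_neg h]; exact hkeys
    have hstepval : ∀ m, pvF (if PySem.Dict.getD d a a = cu then PySem.Dict.insert d a cv else d) m
        = if m = a ∧ pvF d0 m = cu then cv else pvF d m := by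
      intro m
      by_cases h : PySem.Dict.getD d a a = cu
      · rw [if_pos h, pvF_insert]
        by_cases hm : m = a
        · have hcu0 : pvF d0 m = cu := by rw [hm, ← hagreek]; exact h
          rw [if_pos ⟨hm, hcu0⟩]
          simp [pvUpd, hm]
        · simp only [pvUpd, if_neg hm]
          rw [if_neg (show ¬(m = a ∧ pvF d0 m = cu) from fun hcc => hm hcc.1)]
      · rw [if_neg h]
        have hnc : ¬(m = a ∧ pvF d0 m = cu) := by
          intro hcc
          apply h
          have h5 : pvF d0 a = cu := by rw [← hcc.1]; exact hcc.2
          show pvF d a = cu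
          rw [hagreek]; exact h5
        rw [if_neg hnc]
    have hndL' : L'.Nodup := (List.nodup_cons.mp hnd).2
    have hkL' : a ∉ L' := (List.nodup_cons.mp hnd).1
    have hsub' : ∀ m ∈ L', m ∈ K := fun m hm => hsub m (by simp [hm])
    have hagree' : ∀ m ∈ L', pvF (if PySem.Dict.getD d a a = cu then PySem.Dict.insert d a cv else d) m = pvF d0 m := by
      intro m hm
      rw [hstepval m, if_neg (show ¬(m = a ∧ pvF d0 m = cu) from fun hcc => hkL' (hcc.1 ▸ hm))]
      exact hagree m (by simp [hm])
    obtain ⟨ihk, ihv⟩ := ih (if PySem.Dict.getD d a a = cu then PySem.Dict.insert d a cv else d) d0 K hndL' hsub' hkeysstep hagree'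
    constructor
    · simpa using ihk
    · intro m
      simp only [List.foldl_cons]
      rw [ihv m, hstepval m]
      by_cases h1 : m ∈ L' ∧ pvF d0 m = cu
      · rw [if_pos h1, if_pos ⟨by simp [h1.1], h1.2⟩]
      · rw [if_neg h1]
        by_cases h2 : m = a ∧ pvF d0 m = cu
        · rw [if_pos h2, if_pos ⟨by simp [h2.1], h2.2⟩]
        · rw [if_neg h2, if_neg ?_]
          intro hcc
          rcases hcc with ⟨hmem, hcu⟩
          rcases List.mem_cons.mp hmem with h | h
          · exact h2 ⟨h, hcu⟩
          · exact h1 ⟨h, hcu⟩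

theorem pv_relabel_spec (d : PySem.Dict Int Int) (cu cv : Int) (K : List Int)
    (hkeys : PySem.Dict.keys d = K) (hnd : K.Nodup) :
    PySem.Dict.keys (pvRelabel d cu cv) = K ∧
    (∀ m ∈ K, pvF (pvRelabel d cu cv) m = if pvF d m = cu then cv else pvF d m) := by
  unfold pvRelabel
  rw [hkeys]
  obtain ⟨h1, h2⟩ := pv_relabel_go cu cv K d d K hnd (fun m hm => hm) hkeys (fun m _ => rfl)
  refine ⟨h1, fun m hm => ?_⟩
  rw [h2 m]
  by_cases h : pvF d m = cu
  · rw [if_pos ⟨hm, h⟩, if_pos h]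
  · rw [if_neg (show ¬(m ∈ K ∧ pvF d m = cu) from fun hcc => h hcc.2), if_neg h]

-- propositional core: redirecting class(u) to class(v) changes the two
-- partition kernels identically
theorem pv_kernel_step (rt lB : Int → Int) (K : List Int) (u v : Int)
    (hker : ∀ m ∈ K, ∀ n ∈ K, (rt m = rt n ↔ lB m = lB n)) (hu : u ∈ K) (hv : v ∈ K) :
    ∀ m ∈ K, ∀ n ∈ K,
      ((if rt m = rt u then rt v else rt m) = (if rt n = rt u then rt v else rt n) ↔
       (if lB m = lB u then lB v else lB m) = (if lB n = lB u then lB v else lB n)) := by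
  intro m hm n hn
  have hLm := hker m hm u hu
  have hLn := hker n hn u hu
  have hQm := hker m hm v hv
  have hQn := hker n hn v hv
  have hmn := hker m hm n hn
  by_cases hPm : rt m = rt u <;> by_cases hPn : rt n = rt u
  · rw [if_pos hPm, if_pos hPn, if_pos (hLm.mp hPm), if_pos (hLn.mp hPn)]
    simp
  · rw [if_pos hPm, if_neg hPn, if_pos (hLm.mp hPm), if_neg (fun h => hPn (hLn.mpr h))]
    constructor
    · intro h; exact (hQn.mp h.symm).symm
    · intro h; exact (hQn.mpr h.symm).symm
  · rw [if_neg hPm, if_pos hPn, if_neg (fun h => hPm (hLm.mpr h)), if_pos (hLn.mp hPn)]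
    exact hQm
  · rw [if_neg hPm, if_neg hPn, if_neg (fun h => hPm (hLm.mpr h)), if_neg (fun h => hPn (hLn.mpr h))]
    exact hmn

-- the coupled invariant between A's forest and B's label map
def pvRel (K : List Int) (b : Nat) (pA pB : PySem.Dict Int Int) : Prop :=
  PySem.Dict.keys pA = K ∧ PySem.Dict.keys pB = K ∧
  (∀ y ∈ K, pvF pA y ∈ K) ∧ pvInv b (pvF pA) ∧
  (∀ m ∈ K, ∀ n ∈ K, ((pvF pA)^[b] m = (pvF pA)^[b] n ↔ pvF pB m = pvF pB n))

-- B's per-selected-edge step: the branch body of pvStepB (let-free form)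
def pvStepBCore (d : PySem.Dict Int Int) (e : Int × Int) : PySem.Dict Int Int :=
  if PySem.Dict.getD d e.1 e.1 ≠ PySem.Dict.getD d e.2 e.2
  then pvRelabel d (PySem.Dict.getD d e.1 e.1) (PySem.Dict.getD d e.2 e.2) else d

theorem pvStepB_eq (subset_mask : Int) (d : PySem.Dict Int Int) (i : Int) (e : Int × Int) :
    pvStepB subset_mask d (i, e)
      = if PySem.Int.band subset_mask (1 <<< i.toNat) ≠ 0 then pvStepBCore d e else d := rfl

theorem pv_step_edge (fuel b : Nat) (K : List Int) (hnd : K.Nodup)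
    (pA pB : PySem.Dict Int Int) (e : Int × Int)
    (hb : b < fuel) (hrel : pvRel K b pA pB) (hu : e.1 ∈ K) (hv : e.2 ∈ K) :
    pvRel K (b+1) (pvUnionA fuel pA e.1 e.2) (pvStepBCore pB e) := by
  obtain ⟨hkA, hkB, hcl, hinv, hker⟩ := hrel
  obtain ⟨U1, U2, U3, U4⟩ := pv_union_spec fuel b K pA e.1 e.2 hb hinv hkA hcl hu hv
  have hBval : ∀ m ∈ K, pvF (pvStepBCore pB e) m
      = if pvF pB m = pvF pB e.1 then pvF pB e.2 else pvF pB m := by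
    intro m hm
    unfold pvStepBCore
    by_cases heq : PySem.Dict.getD pB e.1 e.1 = PySem.Dict.getD pB e.2 e.2
    · rw [if_neg (not_ne_iff.mpr heq)]
      by_cases h : pvF pB m = pvF pB e.1
      · rw [if_pos h, h]; exact heq
      · rw [if_neg h]
    · rw [if_pos heq]
      exact (pv_relabel_spec pB _ _ K hkB hnd).2 m hm
  have hBkeys : PySem.Dict.keys (pvStepBCore pB e) = K := by
    unfold pvStepBCore
    by_cases heq : PySem.Dict.getD pB e.1 e.1 = PySem.Dict.getD pB e.2 e.2
    · rw [if_neg (not_ne_iff.mpr heq)]; exact hkB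
    · rw [if_pos heq]
      exact (pv_relabel_spec pB _ _ K hkB hnd).1
  refine ⟨U2, hBkeys, U3, U1, ?_⟩
  intro m hm n hn
  rw [U4 m, U4 n, hBval m hm, hBval n hn]
  exact pv_kernel_step ((pvF pA)^[b]) (pvF pB) K e.1 e.2 hker hu hv m hm n hn

theorem pv_main (fuel : Nat) (K : List Int) (hnd : K.Nodup) :
    ∀ (L : List (Int × Int)) (b : Nat) (pA pB : PySem.Dict Int Int),
      (∀ e ∈ L, e.1 ∈ K ∧ e.2 ∈ K) → b + L.length < fuel → pvRel K b pA pB →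
      pvRel K (b + L.length)
        (L.foldl (fun q e => pvUnionA fuel q e.1 e.2) pA)
        (L.foldl pvStepBCore pB) := by
  intro L
  induction L with
  | nil => intro b pA pB _ _ hrel; simpa using hrel
  | cons e L' ih =>
    intro b pA pB hend hbound hrel
    have hstep := pv_step_edge fuel b K hnd pA pB e (by simp at hbound; omega) hrel
      (hend e (by simp)).1 (hend e (by simp)).2
    have hend' : ∀ e' ∈ L', e'.1 ∈ K ∧ e'.2 ∈ K := fun e' he' => hend e' (by simp [he'])
    have hbound' : (b+1) + L'.length < fuel := by simp at hbound; omega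
    have hres := ih (b+1) _ _ hend' hbound' hstep
    simp only [List.foldl_cons, List.length_cons]
    rw [show b + (L'.length + 1) = (b+1) + L'.length from by omega]
    exact hres

theorem pv_roots_fold (fuel b : Nat) (K : List Int) :
    ∀ (ns : List Int) (p : PySem.Dict Int Int) (s : PySem.Set Int),
      b < fuel → pvInv b (pvF p) → PySem.Dict.keys p = K → (∀ y ∈ K, pvF p y ∈ K) →
      (ns.foldl (fun acc n => ((PySem.Set.add acc.1 (pvFindA fuel acc.2 n).1, (pvFindA fuel acc.2 n).2) : PySem.Set Int × PySem.Dict Int Int)) (s, p)).1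
        = ns.foldl (fun s' n => PySem.Set.add s' ((pvF p)^[b] n)) s := by
  intro ns
  induction ns with
  | nil => intro p s _ _ _ _; rfl
  | cons n ns' ih =>
    intro p s hb hinv hkeys hclosed
    obtain ⟨C1, C2, C3, C4, C5, C6⟩ := pv_find_spec fuel p n b b K hb (hinv n) hinv hkeys hclosed
    simp only [List.foldl_cons]
    rw [ih (pvFindA fuel p n).2 (PySem.Set.add s (pvFindA fuel p n).1) hb C4 C5 C6]
    rw [C1]
    have hfun : (fun (s' : PySem.Set Int) (n' : Int) => PySem.Set.add s' ((pvF (pvFindA fuel p n).2)^[b] n'))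
        = (fun (s' : PySem.Set Int) (n' : Int) => PySem.Set.add s' ((pvF p)^[b] n')) := by
      funext s' n'; rw [C3 n']
    rw [hfun]

-- ===== counting lemmas =====
theorem pv_set_add_of_mem {s : PySem.Set Int} {x : Int} (h : x ∈ s) : PySem.Set.add s x = s := by
  simp [PySem.Set.add, h]

theorem pv_set_add_of_not_mem {s : PySem.Set Int} {x : Int} (h : x ∉ s) :
    PySem.Set.add s x = s ++ [x] := by
  simp [PySem.Set.add, h]

theorem pv_foldl_add_eq_ofList_map (f : Int → Int) (l : List Int) :
    l.foldl (fun s n => PySem.Set.add s (f n)) PySem.Set.empty = PySem.Set.ofList (l.map f) := by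
  rw [← PySem.Set.update_map_eq_foldl_add, PySem.Set.update_empty]

theorem pv_len_ofList (l : List Int) : (PySem.Set.ofList l).length = l.toFinset.card := by
  have h1 : (PySem.Set.ofList l).Nodup := by
    rw [← PySem.List.dedup_eq_ofList]; exact PySem.List.nodup_dedup l
  have h2 : (PySem.Set.ofList l).toFinset = l.toFinset := by
    ext a
    simp only [List.mem_toFinset]
    rw [← PySem.List.dedup_eq_ofList, PySem.List.mem_dedup]
  rw [← List.toFinset_card_of_nodup h1, h2]

theorem pv_toFinset_map (f : Int → Int) (l : List Int) :
    (l.map f).toFinset = l.toFinset.image f := by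
  ext a; simp

theorem pv_card_image_eq (f g : Int → Int) (s : Finset Int)
    (h : ∀ m ∈ s, ∀ n ∈ s, (f m = f n ↔ g m = g n)) : (s.image f).card = (s.image g).card := by
  induction s using Finset.induction_on with
  | empty => simp
  | insert a s ha ih =>
    rw [Finset.image_insert, Finset.image_insert]
    have hmem : f a ∈ s.image f ↔ g a ∈ s.image g := by
      simp only [Finset.mem_image]
      constructor
      · rintro ⟨m, hms, hfm⟩
        exact ⟨m, hms, (h m (by simp [hms]) a (by simp)).mp hfm⟩
      · rintro ⟨m, hms, hgm⟩
        exact ⟨m, hms, (h m (by simp [hms]) a (by simp)).mpr hgm⟩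
    have ih' := ih (fun m hm n hn => h m (by simp [hm]) n (by simp [hn]))
    by_cases hf : f a ∈ s.image f
    · rw [Finset.insert_eq_self.mpr hf, Finset.insert_eq_self.mpr (hmem.mp hf), ih']
    · rw [Finset.card_insert_of_notMem hf,
        Finset.card_insert_of_notMem (fun hg => hf (hmem.mpr hg)), ih']

-- ===== initial dict lemmas =====
theorem pv_init_getD : ∀ (l : List Int) (d : PySem.Dict Int Int),
    (∀ y, pvF d y = y) →
    ∀ y, pvF (l.foldl (fun d' n => PySem.Dict.insert d' n n) d) y = y := by
  intro l
  induction l with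
  | nil => intro d h y; exact h y
  | cons n l' ih =>
    intro d h y
    simp only [List.foldl_cons]
    refine ih _ ?_ y
    intro z
    rw [pvF_insert]
    by_cases hz : z = n
    · simp [pvUpd, hz]
    · simp only [pvUpd, if_neg hz]; exact h z

theorem pv_init_keys : ∀ (l : List Int) (d : PySem.Dict Int Int),
    PySem.Dict.keys (l.foldl (fun d' n => PySem.Dict.insert d' n n) d)
      = l.foldl PySem.Set.add (PySem.Dict.keys d) := by
  intro l
  induction l with
  | nil => intro d; rfl
  | cons n l' ih =>
    intro d
    simp only [List.foldl_cons]
    rw [ih]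
    by_cases h : n ∈ PySem.Dict.keys d
    · have hcont : PySem.Dict.contains d n = true := (PySem.Dict.contains_iff_mem_keys d n).mpr h
      rw [PySem.Dict.keys_insert_of_contains d n hcont, pv_set_add_of_mem h]
    · have hcont : PySem.Dict.contains d n = false := by
        by_cases hcc : PySem.Dict.contains d n = true
        · exact absurd ((PySem.Dict.contains_iff_mem_keys d n).mp hcc) h
        · simpa using hcc
      rw [PySem.Dict.keys_insert_of_not_contains d n hcont, pv_set_add_of_not_mem h]

theorem pv_getD_default_irrel (d : PySem.Dict Int Int) (k d1 d2 : Int)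
    (hk : k ∈ PySem.Dict.keys d) :
    PySem.Dict.getD d k d1 = PySem.Dict.getD d k d2 := by
  rcases h : PySem.Dict.get? d k with _ | v
  · exact absurd ((PySem.Dict.get?_eq_none_iff_not_mem_keys d k).mp h) (by simpa using hk)
  · rw [PySem.Dict.getD_eq_get?_getD, PySem.Dict.getD_eq_get?_getD, h]
    rfl

-- selected-edge endpoints lie in nodes, hence in K
theorem pv_sub_mem (nodes : List Int) (all_edges : List (Int × Int)) (subset_mask : Int)
    (hpre : Pre_rank_and_nullity_py nodes all_edges subset_mask) :
    ∀ e ∈ (PySem.List.pyRange 0 (all_edges.length : Int) 1).filterMap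
        (fun i => if PySem.Int.band subset_mask (1 <<< i.toNat) ≠ 0
                  then some (PySem.List.pyGetD all_edges i (0, 0)) else none),
      e.1 ∈ nodes ∧ e.2 ∈ nodes := by
  intro e he
  rw [List.mem_filterMap] at he
  obtain ⟨i, hi, hsome⟩ := he
  by_cases hcond : PySem.Int.band subset_mask (1 <<< i.toNat) ≠ 0
  · rw [if_pos hcond] at hsome
    have he2 : PySem.List.pyGetD all_edges i ((0:Int), (0:Int)) = e := by injection hsome
    have hmem : (i, e) ∈ PySem.List.enumerate all_edges 0 := by
      rw [PySem.List.enumerate_eq_map_pyRange all_edges ((0:Int), (0:Int))]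
      rw [List.mem_map]
      refine ⟨i, ?_, by rw [he2]⟩
      simpa [PySem.List.len_eq] using hi
    exact hpre (i, e) hmem hcond
  · rw [if_neg hcond] at hsome; cases hsome

theorem pv_foldl_ext {α β : Type} (f g : β → α → β) :
    ∀ (l : List α) (init : β), (∀ b a, a ∈ l → f b a = g b a) →
      l.foldl f init = l.foldl g init := by
  intro l
  induction l with
  | nil => intro init _; rfl
  | cons a l' ih =>
    intro init h
    simp only [List.foldl_cons]
    rw [h init a (by simp)]
    exact ih (g init a) (fun b a' ha' => h b a' (by simp [ha']))

theorem pv_foldl_filterMap {α β δ : Type} (f : α → Option β) (g : δ → β → δ) :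
    ∀ (l : List α) (init : δ),
      (l.filterMap f).foldl g init
        = l.foldl (fun d a => match f a with | some b => g d b | none => d) init := by
  intro l
  induction l with
  | nil => intro init; rfl
  | cons a l' ih =>
    intro init
    rw [List.filterMap_cons]
    rcases h : f a with _ | b
    · simp only [List.foldl_cons, h]
      exact ih init
    · simp only [List.foldl_cons, h]
      exact ih (g init b)

-- B's fold over enumerate(all_edges) with the mask test equals the fold of the
-- per-edge step over A's selected-edge list
theorem pv_fold_enum (all_edges : List (Int × Int)) (subset_mask : Int)
    (pB0 : PySem.Dict Int Int) :
    (PySem.List.enumerate all_edges 0).foldl (pvStepB subset_mask) pB0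
      = ((PySem.List.pyRange 0 (all_edges.length : Int) 1).filterMap
          (fun i => if PySem.Int.band subset_mask (1 <<< i.toNat) ≠ 0
                    then some (PySem.List.pyGetD all_edges i (0, 0)) else none)).foldl
          pvStepBCore pB0 := by
  rw [PySem.List.enumerate_eq_map_pyRange all_edges ((0:Int), (0:Int))]
  simp only [PySem.List.len_eq]
  rw [List.foldl_map, pv_foldl_filterMap]
  apply pv_foldl_ext
  intro d i _
  rw [pvStepB_eq]
  by_cases h : PySem.Int.band subset_mask (1 <<< i.toNat) ≠ 0
  · rw [if_pos h, if_pos h]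
  · rw [if_neg h, if_neg h]

-- the heart: equal component counts
theorem pv_count_eq (nodes : List Int) (all_edges : List (Int × Int)) (subset_mask : Int)
    (hpre : Pre_rank_and_nullity_py nodes all_edges subset_mask) :
    pvConnectedComponents nodes
        ((PySem.List.pyRange 0 (all_edges.length : Int) 1).filterMap
          (fun i => if PySem.Int.band subset_mask (1 <<< i.toNat) ≠ 0
                    then some (PySem.List.pyGetD all_edges i (0, 0)) else none))
      = ((PySem.Set.ofList (PySem.Dict.values
            ((PySem.List.enumerate all_edges 0).foldl (pvStepB subset_mask)
              (nodes.foldl (fun d n => PySem.Dict.insert d n n) PySem.Dict.empty)))).length : Int) := by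
  set subA := (PySem.List.pyRange 0 (all_edges.length : Int) 1).filterMap
      (fun i => if PySem.Int.band subset_mask (1 <<< i.toNat) ≠ 0
                then some (PySem.List.pyGetD all_edges i (0, 0)) else none) with hsubA
  set p0 := nodes.foldl (fun d n => PySem.Dict.insert d n n) PySem.Dict.empty with hp0
  set K := PySem.List.dedup nodes with hK
  have hndK : K.Nodup := PySem.List.nodup_dedup nodes
  have hmemK : ∀ y, y ∈ K ↔ y ∈ nodes := fun y => PySem.List.mem_dedup nodes y
  have hid : ∀ y, pvF p0 y = y :=
    pv_init_getD nodes PySem.Dict.empty (fun y => by simp [pvF])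
  have hkeys0 : PySem.Dict.keys p0 = K := by
    rw [hp0, pv_init_keys nodes PySem.Dict.empty,
      show PySem.Dict.keys (PySem.Dict.empty : PySem.Dict Int Int) = ([] : List Int) from rfl,
      hK, PySem.List.dedup_eq_ofList, PySem.Set.ofList_eq_foldl]
  have hrel0 : pvRel K 0 p0 p0 := by
    refine ⟨hkeys0, hkeys0, ?_, ?_, ?_⟩
    · intro y hy; rw [hid y]; exact hy
    · intro y; simp [hid]
    · intro m _ n _; simp [hid]
  have hend : ∀ e ∈ subA, e.1 ∈ K ∧ e.2 ∈ K := by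
    intro e he
    obtain ⟨h1, h2⟩ := pv_sub_mem nodes all_edges subset_mask hpre e he
    exact ⟨(hmemK _).mpr h1, (hmemK _).mpr h2⟩
  have hbound : 0 + subA.length < nodes.length + subA.length + 1 := by omega
  have hrelF := pv_main (nodes.length + subA.length + 1) K hndK subA 0 p0 p0 hend hbound hrel0
  rw [Nat.zero_add] at hrelF
  obtain ⟨hkA, hkB, hcl, hinv, hker⟩ := hrelF
  -- A's count
  have hA : pvConnectedComponents nodes subA
      = (((nodes.map ((pvF (subA.foldl (fun q e => pvUnionA (nodes.length + subA.length + 1) q e.1 e.2) p0))^[subA.length])).toFinset.card : Nat) : Int) := by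
    have hA0 : pvConnectedComponents nodes subA
        = ((nodes.foldl
            (fun acc n => ((PySem.Set.add acc.1 (pvFindA (nodes.length + subA.length + 1) acc.2 n).1,
                (pvFindA (nodes.length + subA.length + 1) acc.2 n).2) : PySem.Set Int × PySem.Dict Int Int))
            (PySem.Set.empty,
              subA.foldl (fun q e => pvUnionA (nodes.length + subA.length + 1) q e.1 e.2) p0)).1.length : Int) := rfl
    rw [hA0,
      pv_roots_fold (nodes.length + subA.length + 1) subA.length K nodes _ PySem.Set.empty
        (by omega) hinv hkA hcl,
      pv_foldl_add_eq_ofList_map, pv_len_ofList]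
  -- B's count
  have hBfold : (PySem.List.enumerate all_edges 0).foldl (pvStepB subset_mask) p0
      = subA.foldl pvStepBCore p0 := by
    rw [pv_fold_enum all_edges subset_mask p0, ← hsubA]
  have hvals : PySem.Dict.values (subA.foldl pvStepBCore p0)
      = K.map (pvF (subA.foldl pvStepBCore p0)) := by
    have hv0 := PySem.Dict.values_eq_map_keys (subA.foldl pvStepBCore p0) (hkB ▸ hndK) 0
    rw [hkB] at hv0
    rw [hv0]
    apply List.map_congr_left
    intro k hk
    exact pv_getD_default_irrel (subA.foldl pvStepBCore p0) k 0 k (hkB ▸ hk)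
  have hB : ((PySem.Set.ofList (PySem.Dict.values
        ((PySem.List.enumerate all_edges 0).foldl (pvStepB subset_mask) p0))).length : Int)
      = (((K.map (pvF (subA.foldl pvStepBCore p0))).toFinset.card : Nat) : Int) := by
    rw [hBfold, hvals, pv_len_ofList]
  rw [hA, hB]
  have htF : K.toFinset = nodes.toFinset := by
    ext a; simp only [List.mem_toFinset]; exact hmemK a
  have hcards : ((nodes.map ((pvF (subA.foldl (fun q e => pvUnionA (nodes.length + subA.length + 1) q e.1 e.2) p0))^[subA.length])).toFinset.card)
      = ((K.map (pvF (subA.foldl pvStepBCore p0))).toFinset.card) := by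
    rw [pv_toFinset_map, pv_toFinset_map, htF]
    exact pv_card_image_eq _ _ _
      (fun m hm n hn => hker m ((hmemK m).mpr (List.mem_toFinset.mp hm))
        n ((hmemK n).mpr (List.mem_toFinset.mp hn)))
  rw [hcards]

-- ===== VERDICT (by name: the statement is the Claim_ definition above) =====
theorem rank_and_nullity_py_spec : Claim_equal_rank_and_nullity_py := by
  unfold Claim_equal_rank_and_nullity_py
  intro nodes all_edges subset_mask _ hpre
  unfold Spec_rank_and_nullity_py
  have h := pv_count_eq nodes all_edges subset_mask hpre
  have hA0 : rank_and_nullity_py nodes all_edges subset_mask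
      = ((nodes.length : Int) - pvConnectedComponents nodes
            ((PySem.List.pyRange 0 (all_edges.length : Int) 1).filterMap
              (fun i => if PySem.Int.band subset_mask (1 <<< i.toNat) ≠ 0
                        then some (PySem.List.pyGetD all_edges i (0, 0)) else none)),
         (PySem.Int.bitCount subset_mask : Int)
           - ((nodes.length : Int) - pvConnectedComponents nodes
              ((PySem.List.pyRange 0 (all_edges.length : Int) 1).filterMap
                (fun i => if PySem.Int.band subset_mask (1 <<< i.toNat) ≠ 0
                          then some (PySem.List.pyGetD all_edges i (0, 0)) else none)))) := rfl
  have hB0 : rank_and_nullity_py_alt nodes all_edges subset_mask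
      = ((nodes.length : Int) - ((PySem.Set.ofList (PySem.Dict.values
              ((PySem.List.enumerate all_edges 0).foldl (pvStepB subset_mask)
                (nodes.foldl (fun d n => PySem.Dict.insert d n n) PySem.Dict.empty)))).length : Int),
         (PySem.Int.bitCount subset_mask : Int)
           - ((nodes.length : Int) - ((PySem.Set.ofList (PySem.Dict.values
              ((PySem.List.enumerate all_edges 0).foldl (pvStepB subset_mask)
                (nodes.foldl (fun d n => PySem.Dict.insert d n n) PySem.Dict.empty)))).length : Int))) := rfl
  rw [hA0, hB0, h]
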